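-- pv_equiv track=rewrite | github.com/noidrequired/monthly_business_review | app.py | parse_exceptions
-- ===== SOURCE A (Python) =====
-- from typing import List, Dict, Optional, Tuple
--
-- def parse_exceptions(val: str) -> List[str]:
--     if val is None:
--         return []
--     s = str(val).strip()
--     if s == "" or s.lower() == "nan":
--         return []
--     # Split on common separators
--     parts = []
--     for token in s.replace("|", ";").replace(",", ";").split(";"):
--         t = token.strip()
--         if t:
--             parts.append(t)
--     return parts
-- ===== SOURCE B (Python) =====
-- def parse_exceptions(val):
--     if val is None:
--         return []
--     s = str(val).strip()
--     if s == "" or s.lower() == "nan":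
--         return []
--     # one-pass scan: accumulate a token buffer, flush at each separator
--     parts = []
--     buf = ""
--     for ch in s:
--         if ch in ";|,":
--             t = buf.strip()
--             if t:
--                 parts.append(t)
--             buf = ""
--         else:
--             buf += ch
--     t = buf.strip()
--     if t:
--         parts.append(t)
--     return parts
-- ===== Notes on version B (the rewrite author's own statement) =====
-- stated objective: alternative
-- what changed: Replaced the replace-chain-then-split-then-filter pipeline (which builds three intermediate strings and a list of raw tokens) by a single left-to-right scan with a token buffer that flushes a stripped token at each separator.
import Mathlib
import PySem

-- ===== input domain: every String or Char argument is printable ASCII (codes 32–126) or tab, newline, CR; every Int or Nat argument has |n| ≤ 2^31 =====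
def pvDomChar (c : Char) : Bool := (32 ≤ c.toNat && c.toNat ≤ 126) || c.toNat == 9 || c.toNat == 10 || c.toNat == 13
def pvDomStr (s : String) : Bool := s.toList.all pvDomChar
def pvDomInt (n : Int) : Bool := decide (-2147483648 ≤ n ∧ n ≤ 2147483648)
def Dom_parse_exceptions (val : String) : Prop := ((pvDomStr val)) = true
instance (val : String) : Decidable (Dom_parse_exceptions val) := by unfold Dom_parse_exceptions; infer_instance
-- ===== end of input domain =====

-- B replaces A's replace-chain → split → strip/filter pipeline by a single scan with a
-- token buffer flushed at each separator; same return value, no speed claim (alternative).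

-- ===== PORT A =====
-- literal transliteration of A at the char-list level (PySem.Chars.* are the exact
-- semantics of str.replace/str.split/str.strip; 'if t:' is nonemptiness of t)
def parse_exceptions (val : String) : List String :=
  let s := PySem.Str.strip val
  if s = "" ∨ PySem.Str.lower s = "nan" then []
  else
    (PySem.Chars.splitOn
        (PySem.Chars.replace (PySem.Chars.replace s.toList ['|'] [';']) [','] [';'])
        [';']).foldl
      (fun parts token =>
        if !(PySem.Chars.strip token).isEmpty then
          parts ++ [String.ofList (PySem.Chars.strip token)]
        else parts) []

-- ===== PORT B =====
def pvIsSep (c : Char) : Bool := c == ';' || c == '|' || c == ','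

-- 't = buf.strip(); if t: parts.append(t)'
def pvFlush (parts : List String) (buf : List Char) : List String :=
  if !(PySem.Chars.strip buf).isEmpty then parts ++ [String.ofList (PySem.Chars.strip buf)]
  else parts

def parse_exceptions_alt (val : String) : List String :=
  let s := PySem.Str.strip val
  if s = "" ∨ PySem.Str.lower s = "nan" then []
  else
    let st := s.toList.foldl
      (fun (st : List String × List Char) c =>
        if pvIsSep c then (pvFlush st.1 st.2, []) else (st.1, st.2 ++ [c]))
      ([], [])
    pvFlush st.1 st.2

-- ===== PRECONDITION & SPEC =====
def Spec_parse_exceptions (val : String) (out : List String) : Prop := out = parse_exceptions_alt val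
instance (val : String) (out : List String) : Decidable (Spec_parse_exceptions val out) := by unfold Spec_parse_exceptions; infer_instance

-- ===== CLAIM (what is proved, stated in full; the proofs are below) =====
def Claim_equal_parse_exceptions : Prop := ∀ (val : String), Dom_parse_exceptions val → Spec_parse_exceptions val (parse_exceptions val)

-- ===== LEMMAS AND PROOFS =====

-- spec-side split on a single character (proof helper only)
def splitChar (sep : Char) : List Char → List (List Char)
  | [] => [[]]
  | c :: t => if c = sep then [] :: splitChar sep t else (splitChar sep t).modifyHead (c :: ·)

lemma splitChar_ne_nil (sep : Char) (s : List Char) : splitChar sep s ≠ [] := by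
  cases s with
  | nil => simp [splitChar]
  | cons c t =>
    simp only [splitChar]
    split
    · simp
    · intro h
      exact splitChar_ne_nil sep t (by simpa using congrArg List.length h)

lemma replace_go_single (o n : Char) :
    ∀ (fuel : Nat) (l acc : List Char), l.length ≤ fuel →
      PySem.Chars.replace.go [o] [n] fuel l acc
        = acc.reverse ++ l.map (fun c => if c = o then n else c) := by
  intro fuel
  induction fuel with
  | zero =>
    intro l acc h
    have : l = [] := by cases l <;> simp_all
    subst this; simp [PySem.Chars.replace.go]
  | succ fuel ih =>
    intro l acc h
    cases l with
    | nil => simp [PySem.Chars.replace.go]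
    | cons c t =>
      have ht : t.length ≤ fuel := by simpa using h
      by_cases hc : c = o
      · have hp : List.isPrefixOf [o] (c :: t) = true := by simp [List.isPrefixOf, hc]
        simp only [PySem.Chars.replace.go, hp, if_true]
        rw [show List.drop (List.length [o]) (c :: t) = t from rfl]
        rw [ih t (List.reverse [n] ++ acc) ht]
        simp [hc]
      · have hp : List.isPrefixOf [o] (c :: t) = false := by
          simp [List.isPrefixOf, Ne.symm hc]
        simp only [PySem.Chars.replace.go, hp, Bool.false_eq_true, if_false]
        rw [ih t (c :: acc) ht]
        simp [hc]

lemma replace_single (s : List Char) (o n : Char) :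
    PySem.Chars.replace s [o] [n] = s.map (fun c => if c = o then n else c) := by
  simp [PySem.Chars.replace, replace_go_single o n s.length s [] (le_refl _)]

lemma splitOn_go_single (sep : Char) :
    ∀ (fuel : Nat) (l cur : List Char) (acc : List (List Char)), l.length ≤ fuel →
      PySem.Chars.splitOn.go [sep] fuel l cur acc
        = acc.reverse ++ (splitChar sep l).modifyHead (cur.reverse ++ ·) := by
  intro fuel
  induction fuel with
  | zero =>
    intro l cur acc h
    have : l = [] := by cases l <;> simp_all
    subst this; simp [PySem.Chars.splitOn.go, splitChar, List.modifyHead]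
  | succ fuel ih =>
    intro l cur acc h
    cases l with
    | nil => simp [PySem.Chars.splitOn.go, splitChar, List.modifyHead]
    | cons c t =>
      have ht : t.length ≤ fuel := by simpa using h
      by_cases hc : c = sep
      · have hp : List.isPrefixOf [sep] (c :: t) = true := by simp [List.isPrefixOf, hc]
        simp only [PySem.Chars.splitOn.go, hp, if_true]
        rw [show List.drop (List.length [sep]) (c :: t) = t from rfl]
        rw [ih t [] (List.reverse cur :: acc) ht]
        simp only [splitChar, hc, if_true]
        cases splitChar sep t <;> simp [List.modifyHead]
      · have hp : List.isPrefixOf [sep] (c :: t) = false := by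
          simp [List.isPrefixOf, Ne.symm hc]
        simp only [PySem.Chars.splitOn.go, hp, Bool.false_eq_true, if_false]
        rw [ih t (c :: cur) acc ht]
        simp only [splitChar, hc, if_false]
        congr 1
        obtain ⟨x, xs, hx⟩ := List.exists_cons_of_ne_nil (splitChar_ne_nil sep t)
        simp [hx, List.modifyHead]

lemma splitOn_single (sep : Char) (s : List Char) :
    PySem.Chars.splitOn s [sep] = splitChar sep s := by
  have h := splitOn_go_single sep (s.length + 1) s [] [] (by omega)
  simp only [PySem.Chars.splitOn] at *
  rw [h]
  obtain ⟨x, xs, hx⟩ := List.exists_cons_of_ne_nil (splitChar_ne_nil sep s)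
  simp [hx, List.modifyHead]

lemma splitChar_not_mem (sep : Char) (s : List Char) (h : sep ∉ s) :
    splitChar sep s = [s] := by
  induction s with
  | nil => simp [splitChar]
  | cons c t ih =>
    simp only [List.mem_cons, not_or] at h
    simp [splitChar, Ne.symm h.1, ih h.2, List.modifyHead]

lemma splitChar_append_sep (sep : Char) (pre rest : List Char) (h : sep ∉ pre) :
    splitChar sep (pre ++ sep :: rest) = pre :: splitChar sep rest := by
  induction pre with
  | nil => simp [splitChar]
  | cons c t ih =>
    simp only [List.mem_cons, not_or] at h
    simp only [List.cons_append, splitChar, Ne.symm h.1, if_false, ih h.2]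
    simp [List.modifyHead]

-- the two single-char replaces of A, fused as one map
lemma map_replace_fuse (s : List Char) :
    ((s.map (fun c => if c = '|' then ';' else c)).map (fun c => if c = ',' then ';' else c))
      = s.map (fun c => if pvIsSep c then ';' else c) := by
  induction s with
  | nil => rfl
  | cons c t ih =>
    simp only [List.map_cons, ih, pvIsSep]
    congr 1
    by_cases h1 : c = ';' <;> by_cases h2 : c = '|' <;> by_cases h3 : c = ',' <;>
      simp_all

lemma map_sep_free (buf : List Char) (h : ∀ c ∈ buf, pvIsSep c = false) :
    buf.map (fun c => if pvIsSep c then ';' else c) = buf := by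
  induction buf with
  | nil => rfl
  | cons c t ih =>
    have hc := h c (by simp)
    simp [hc, ih (fun c hm => h c (by simp [hm]))]

lemma semi_not_mem_sep_free (buf : List Char) (h : ∀ c ∈ buf, pvIsSep c = false) :
    ';' ∉ buf := by
  intro hm
  have := h ';' hm
  simp [pvIsSep] at this

-- B's scan with buffer buf equals A's pipeline applied to buf ++ cs (buf separator-free)
lemma scan_eq (cs : List Char) : ∀ (parts : List String) (buf : List Char),
    (∀ c ∈ buf, pvIsSep c = false) →
    (let st := cs.foldl
        (fun (st : List String × List Char) c =>
          if pvIsSep c then (pvFlush st.1 st.2, []) else (st.1, st.2 ++ [c]))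
        (parts, buf)
     pvFlush st.1 st.2)
      = parts ++
        ((splitChar ';' ((buf ++ cs).map (fun c => if pvIsSep c then ';' else c))).filter
            (fun t => !(PySem.Chars.strip t).isEmpty)).map
          (fun t => String.ofList (PySem.Chars.strip t)) := by
  induction cs with
  | nil =>
    intro parts buf h
    simp only [List.foldl_nil, List.append_nil]
    rw [map_sep_free buf h, splitChar_not_mem ';' buf (semi_not_mem_sep_free buf h)]
    by_cases hp : (!(PySem.Chars.strip buf).isEmpty) = true <;>
      simp [pvFlush, hp, List.filter]
  | cons c t ih =>
    intro parts buf h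
    by_cases hc : pvIsSep c = true
    · simp only [List.foldl_cons, hc, if_pos]
      rw [ih (pvFlush parts buf) [] (by simp)]
      have : (buf ++ c :: t).map (fun c => if pvIsSep c then ';' else c)
          = buf ++ ';' :: t.map (fun c => if pvIsSep c then ';' else c) := by
        simp [map_sep_free buf h, hc]
      rw [this, splitChar_append_sep ';' buf _ (semi_not_mem_sep_free buf h)]
      by_cases hp : (!(PySem.Chars.strip buf).isEmpty) = true <;>
        simp [pvFlush, hp, List.filter]
    · simp only [List.foldl_cons, hc, if_neg, Bool.false_eq_true, not_false_iff]
      have hs : ∀ d ∈ buf ++ [c], pvIsSep d = false := by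
        intro d hd
        rcases List.mem_append.1 hd with hd | hd
        · exact h d hd
        · simp only [List.mem_singleton] at hd; subst hd
          simpa using hc
      rw [ih parts (buf ++ [c]) hs]
      simp

-- ===== VERDICT (by name: the statement is the Claim_ definition above) =====
theorem parse_exceptions_spec : Claim_equal_parse_exceptions := by
  intro val _
  unfold Spec_parse_exceptions parse_exceptions parse_exceptions_alt
  by_cases hg : (PySem.Str.strip val = "" ∨ PySem.Str.lower (PySem.Str.strip val) = "nan")
  · simp [hg]
  · simp only [hg, if_false]
    rw [replace_single, replace_single, map_replace_fuse, splitOn_single]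
    rw [PySem.List.foldl_append_if
        (fun t => !(PySem.Chars.strip t).isEmpty)
        (fun t => String.ofList (PySem.Chars.strip t))]
    rw [scan_eq _ [] [] (by simp)]
    simp
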